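-- pv_equiv track=rewrite | github.com/akalliokoski/gemma-trajad-eval | dataset_builder/perturbation_diagnostics.py | _has_final_assistant_after_tool
-- ===== SOURCE A (Python) =====
-- def _has_final_assistant_after_tool(record: dict) -> bool:
--     traj = record["trajectory"]
--     last_tool_idx = None
--     for i in range(len(traj) - 1, -1, -1):
--         if traj[i].get("role") == "tool":
--             last_tool_idx = i
--             break
--     if last_tool_idx is None:
--         return False
--     return any(step.get("role") == "assistant" for step in traj[last_tool_idx + 1 :])
-- ===== SOURCE B (Python) =====
-- def _has_final_assistant_after_tool(record: dict) -> bool: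
--     tool_seen = False
--     result = False
--     for step in record["trajectory"]:
--         role = step.get("role")
--         if role == "tool":
--             tool_seen = True
--             result = False
--         elif role == "assistant" and tool_seen:
--             result = True
--     return result
-- ===== Notes on version B (the rewrite author's own statement) =====
-- stated objective: simpler
-- what changed: Replaced A's two sequential scans (backward scan for the last tool index, then a scan of the suffix for an assistant) by one fused forward pass maintaining two booleans (tool_seen, result), where a tool step resets result and a later assistant sets it.
import Mathlib
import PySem

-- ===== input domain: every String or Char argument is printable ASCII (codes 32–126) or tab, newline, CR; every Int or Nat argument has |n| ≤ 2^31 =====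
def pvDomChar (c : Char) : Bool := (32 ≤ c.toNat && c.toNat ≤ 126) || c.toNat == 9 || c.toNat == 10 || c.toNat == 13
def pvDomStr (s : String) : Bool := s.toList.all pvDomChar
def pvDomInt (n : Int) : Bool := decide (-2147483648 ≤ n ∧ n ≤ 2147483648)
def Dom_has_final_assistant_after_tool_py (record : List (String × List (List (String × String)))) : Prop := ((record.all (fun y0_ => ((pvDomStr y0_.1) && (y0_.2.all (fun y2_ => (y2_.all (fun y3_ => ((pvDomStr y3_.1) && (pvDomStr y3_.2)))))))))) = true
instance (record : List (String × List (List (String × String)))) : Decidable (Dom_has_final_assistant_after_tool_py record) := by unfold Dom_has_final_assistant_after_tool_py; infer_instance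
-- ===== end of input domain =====

-- B replaces A's backward find-last-tool scan plus suffix scan by one fused forward pass
-- over the trajectory carrying two booleans (tool_seen, result): simpler, one pass.

-- ===== PORT A =====
-- step.get("role") (shared by both Pythons)
def pvRole (step : List (String × String)) : Option String :=
  (PySem.Dict.mk step).get? "role"

-- the backward 'for i in range(len(traj)-1, -1, -1): … break' loop of A
def pvALoop (traj : List (List (String × String))) : List Int → Option Int
  | [] => none
  | i :: rest =>
      if pvRole (PySem.List.pyGetD traj i []) == some "tool" then some i
      else pvALoop traj rest

def has_final_assistant_after_tool_py (record : List (String × List (List (String × String)))) : Bool :=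
  match (PySem.Dict.mk record).get? "trajectory" with
  | none => false  -- Python raises KeyError here; excluded by Pre_
  | some traj =>
    match pvALoop traj (PySem.List.pyRange (PySem.List.len traj - 1) (-1) (-1)) with
    | none => false
    | some last_tool_idx =>
        (PySem.List.slice traj (some (last_tool_idx + 1)) none).any
          (fun step => pvRole step == some "assistant")

-- ===== PORT B =====
def pvBStep (st : Bool × Bool) (step : List (String × String)) : Bool × Bool :=
  let role := pvRole step
  if role == some "tool" then (true, false)
  else if role == some "assistant" && st.1 then (st.1, true)
  else st

def has_final_assistant_after_tool_py_alt (record : List (String × List (List (String × String)))) : Bool :=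
  match (PySem.Dict.mk record).get? "trajectory" with
  | none => false  -- Python raises KeyError here; excluded by Pre_
  | some traj => (traj.foldl pvBStep (false, false)).2

-- ===== PRECONDITION & SPEC =====
-- Pre_ excludes only records without a "trajectory" key, on which both Pythons raise KeyError.
def Pre_has_final_assistant_after_tool_py (record : List (String × List (List (String × String)))) : Prop :=
  (PySem.Dict.mk record).contains "trajectory" = true
instance (record : List (String × List (List (String × String)))) : Decidable (Pre_has_final_assistant_after_tool_py record) := by unfold Pre_has_final_assistant_after_tool_py; infer_instance

def pvWitness_has_final_assistant_after_tool_py : (List (String × List (List (String × String)))) :=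
  [("trajectory", [[("role", "tool")], [("role", "assistant")]])]

def Spec_has_final_assistant_after_tool_py (record : List (String × List (List (String × String)))) (out : Bool) : Prop := out = has_final_assistant_after_tool_py_alt record
instance (record : List (String × List (List (String × String)))) (out : Bool) : Decidable (Spec_has_final_assistant_after_tool_py record out) := by unfold Spec_has_final_assistant_after_tool_py; infer_instance

-- ===== CLAIM (what is proved, stated in full; the proofs are below) =====
def Claim_equal_has_final_assistant_after_tool_py : Prop := ∀ (record : List (String × List (List (String × String)))), Dom_has_final_assistant_after_tool_py record → Pre_has_final_assistant_after_tool_py record → Spec_has_final_assistant_after_tool_py record (has_final_assistant_after_tool_py record)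

-- ===== LEMMAS AND PROOFS =====

-- the A-side core on a bare trajectory
def pvACore (traj : List (List (String × String))) : Bool :=
  match pvALoop traj (PySem.List.pyRange (PySem.List.len traj - 1) (-1) (-1)) with
  | none => false
  | some i => (PySem.List.slice traj (some (i + 1)) none).any (fun step => pvRole step == some "assistant")

lemma pvALoop_mem {traj : List (List (String × String))} {idxs : List Int} {i : Int}
    (h : pvALoop traj idxs = some i) : i ∈ idxs := by
  induction idxs with
  | nil => simp [pvALoop] at h
  | cons j rest ih =>
      simp only [pvALoop] at h
      split at h
      · simp_all
      · exact List.mem_cons_of_mem _ (ih h)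

lemma pvALoop_append {x : List (String × String)} {traj : List (List (String × String))}
    {idxs : List Int} (h : ∀ i ∈ idxs, 0 ≤ i ∧ i < (traj.length : Int)) :
    pvALoop (traj ++ [x]) idxs = pvALoop traj idxs := by
  induction idxs with
  | nil => rfl
  | cons j rest ih =>
      have hj := h j (by simp)
      have hget : PySem.List.pyGetD (traj ++ [x]) j [] = PySem.List.pyGetD traj j [] := by
        rw [PySem.List.pyGetD_eq_getElem (traj ++ [x]) [] hj.1 (by simp; omega),
            PySem.List.pyGetD_eq_getElem traj [] hj.1 (by simpa using hj.2)]
        exact List.getElem_append_left (by omega)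
      simp only [pvALoop, hget]
      split
      · rfl
      · exact ih (fun i hi => h i (List.mem_cons_of_mem _ hi))

lemma pvALoop_none_iff_gen (traj : List (List (String × String))) (idxs : List Int) :
    pvALoop traj idxs = none ↔
      ∀ i ∈ idxs, (pvRole (PySem.List.pyGetD traj i []) == some "tool") = false := by
  induction idxs with
  | nil => simp [pvALoop]
  | cons j rest ih =>
      simp only [pvALoop]
      split
      · simp_all
      · simp_all

lemma pvALoop_none_iff (traj : List (List (String × String))) :
    pvALoop traj (PySem.List.pyRange ((traj.length : Int) - 1) (-1) (-1)) = none ↔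
      traj.any (fun step => pvRole step == some "tool") = false := by
  rw [pvALoop_none_iff_gen, List.any_eq_false]
  constructor
  · intro h step hmem
    obtain ⟨k, hk, rfl⟩ := List.mem_iff_getElem.mp hmem
    have hi : (k : Int) ∈ PySem.List.pyRange ((traj.length : Int) - 1) (-1) (-1) :=
      PySem.List.mem_pyRange_neg_one.mpr ⟨by omega, by omega⟩
    have := h _ hi
    rw [PySem.List.pyGetD_eq_getElem traj [] (by omega) (by simpa using hk)] at this
    simpa using this
  · intro h i hi
    obtain ⟨h1, h2⟩ := PySem.List.mem_pyRange_neg_one.mp hi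
    have h0 : 0 ≤ i := by omega
    have hlt : i < (traj.length : Int) := by omega
    rw [PySem.List.pyGetD_eq_getElem traj [] h0 hlt]
    have hmem : traj[i.toNat] ∈ traj := List.getElem_mem (by omega)
    simpa using h _ hmem

lemma pvKey (traj : List (List (String × String))) :
    pvACore traj = (traj.foldl pvBStep (false, false)).2 ∧
      (traj.foldl pvBStep (false, false)).1 = traj.any (fun step => pvRole step == some "tool") := by
  induction traj using List.reverseRecOn with
  | nil => simp [pvACore, pvALoop, PySem.List.pyRange_neg_one_eq_nil]
  | append_singleton ys x ih =>
      have hn : PySem.List.len (ys ++ [x]) - 1 = ((ys.length : Nat) : Int) := by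
        simp [PySem.List.len_eq]
      have hrange : PySem.List.pyRange ((ys.length : Nat) : Int) (-1) (-1) =
          ((ys.length : Nat) : Int) :: PySem.List.pyRange (((ys.length : Nat) : Int) - 1) (-1) (-1) :=
        PySem.List.pyRange_neg_one_cons (by omega)
      have hx : PySem.List.pyGetD (ys ++ [x]) ((ys.length : Nat) : Int) [] = x := by
        rw [PySem.List.pyGetD_natCast]
        simp [List.getD]
      have hfold : (ys ++ [x]).foldl pvBStep (false, false) =
          pvBStep (ys.foldl pvBStep (false, false)) x := by
        simp
      have hrest : ∀ i ∈ PySem.List.pyRange (((ys.length : Nat) : Int) - 1) (-1) (-1),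
          0 ≤ i ∧ i < (ys.length : Int) := by
        intro i hi
        obtain ⟨h1, h2⟩ := PySem.List.mem_pyRange_neg_one.mp hi
        exact ⟨by omega, by omega⟩
      by_cases ht : (pvRole x == some "tool") = true
      · constructor
        · unfold pvACore
          rw [hn, hrange]
          simp only [pvALoop, hx, ht, if_true]
          have hc : ((ys.length : Nat) : Int) + 1 = ((ys.length + 1 : Nat) : Int) := by push_cast; ring
          rw [hc, PySem.List.slice_from_natCast]
          rw [hfold]
          have hdrop : List.drop (ys.length + 1) (ys ++ [x]) = ([] : List (List (String × String))) := by
            apply List.drop_eq_nil_of_le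
            simp
          simp [pvBStep, ht, hdrop]
        · rw [hfold]
          simp [pvBStep, ht]
      · have ht' : (pvRole x == some "tool") = false := by simpa using ht
        have hALoop : pvALoop (ys ++ [x])
            (PySem.List.pyRange (PySem.List.len (ys ++ [x]) - 1) (-1) (-1)) =
            pvALoop ys (PySem.List.pyRange (((ys.length : Nat) : Int) - 1) (-1) (-1)) := by
          rw [hn, hrange]
          simp only [pvALoop, hx, ht', Bool.false_eq_true, if_false]
          exact pvALoop_append hrest
        have hysloop : pvACore ys = match pvALoop ys (PySem.List.pyRange (((ys.length : Nat) : Int) - 1) (-1) (-1)) with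
            | none => false
            | some i => (PySem.List.slice ys (some (i + 1)) none).any (fun step => pvRole step == some "assistant") := by
          unfold pvACore
          simp [PySem.List.len_eq]
        cases hLoop : pvALoop ys (PySem.List.pyRange (((ys.length : Nat) : Int) - 1) (-1) (-1)) with
        | none =>
            have hnotool : ys.any (fun step => pvRole step == some "tool") = false := by
              rw [← pvALoop_none_iff]
              simpa using hLoop
            have h1 : (ys.foldl pvBStep (false, false)).1 = false := ih.2.trans hnotool
            have hAys : pvACore ys = false := by rw [hysloop, hLoop]
            have h2 : (ys.foldl pvBStep (false, false)).2 = false := ih.1 ▸ hAys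
            constructor
            · unfold pvACore
              rw [hALoop, hLoop, hfold]
              simp [pvBStep, ht', h1, h2]
            · rw [hfold, List.any_append]
              simp [pvBStep, ht', h1, hnotool]
        | some i =>
            obtain ⟨hgt, hle⟩ := PySem.List.mem_pyRange_neg_one.mp (pvALoop_mem hLoop)
            have h0 : (0 : Int) ≤ i + 1 := by omega
            have htool : ys.any (fun step => pvRole step == some "tool") = true := by
              by_contra hcon
              rw [Bool.not_eq_true, ← pvALoop_none_iff] at hcon
              simp [hcon] at hLoop
            have h1 : (ys.foldl pvBStep (false, false)).1 = true := ih.2.trans htool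
            have hslice : PySem.List.slice (ys ++ [x]) (some (i + 1)) none =
                PySem.List.slice ys (some (i + 1)) none ++ [x] := by
              rw [PySem.List.slice_from _ h0, PySem.List.slice_from _ h0]
              exact List.drop_append_of_le_length (by omega)
            have h2 : (ys.foldl pvBStep (false, false)).2 =
                (PySem.List.slice ys (some (i + 1)) none).any
                  (fun step => pvRole step == some "assistant") := by
              rw [← ih.1, hysloop, hLoop]
            constructor
            · unfold pvACore
              rw [hALoop, hLoop]
              dsimp only
              rw [hslice, hfold, List.any_append]
              rw [← h2]
              cases ha : (pvRole x == some "assistant") <;>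
                simp [pvBStep, ht', h1, ha]
            · rw [hfold, List.any_append]
              simp [pvBStep, ht', h1, htool]
              split <;> simp [h1]

-- ===== VERDICT (by name: the statement is the Claim_ definition above) =====
theorem has_final_assistant_after_tool_py_spec : Claim_equal_has_final_assistant_after_tool_py := by
  intro record _ _
  unfold Spec_has_final_assistant_after_tool_py
  unfold has_final_assistant_after_tool_py has_final_assistant_after_tool_py_alt
  cases h : (PySem.Dict.mk record).get? "trajectory" with
  | none => rfl
  | some traj =>
      have := (pvKey traj).1
      simpa [pvACore, PySem.List.len_eq] using this
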